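-- pv_equiv track=rewrite | github.com/Zhuqian-He/Originality | Code/Arts/preprocessing.py | split_special_chars
-- ===== SOURCE A (Python) =====
-- import string
--
-- def split_special_chars(token: str) -> list:
--     """Split slashes and hyphens"""
--     subwords = []
--     if '/' in token:
--         parts = token.split('/')
--         for part in parts:
--             if '-' in part:
--                 subparts = part.split('-')
--                 subwords.extend(subparts)
--             else:
--                 subwords.append(part)
--     else:
--         if '-' in token:
--             subwords = token.split('-')
--         else:
--             subwords = [token]
--     return [s.strip() for s in subwords if s.strip() and not all(c in string.punctuation for c in s.strip())]
-- ===== SOURCE B (Python) =====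
-- import string
--
-- def split_special_chars(token: str) -> list:
--     """Split slashes and hyphens"""
--     atoms = []
--     buf = ''
--     for ch in token:
--         if ch in '/-':
--             atoms.append(buf)
--             buf = ''
--         else:
--             buf += ch
--     atoms.append(buf)
--     result = []
--     for s in atoms:
--         t = s.strip()
--         if t and any(c not in string.punctuation for c in t):
--             result.append(t)
--     return result
-- ===== Notes on version B (the rewrite author's own statement) =====
-- stated objective: alternative
-- what changed: Replaces the nested split-on-slash-then-hyphen branching with one left-to-right character scan that flushes a buffer at every delimiter, followed by an explicit filtering loop instead of the comprehension.
import Mathlib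
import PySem

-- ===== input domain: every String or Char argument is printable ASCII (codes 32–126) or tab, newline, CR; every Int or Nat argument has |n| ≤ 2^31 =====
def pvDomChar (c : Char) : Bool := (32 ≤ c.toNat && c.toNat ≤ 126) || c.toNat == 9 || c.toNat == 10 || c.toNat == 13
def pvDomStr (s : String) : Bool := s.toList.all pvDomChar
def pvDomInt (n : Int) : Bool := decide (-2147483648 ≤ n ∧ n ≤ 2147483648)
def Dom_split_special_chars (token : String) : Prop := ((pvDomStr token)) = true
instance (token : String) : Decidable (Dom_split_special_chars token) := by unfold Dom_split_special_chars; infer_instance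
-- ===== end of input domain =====

-- B replaces A's nested split-on-slash-then-hyphen branching by a single character scan with a
-- buffer (alternative decomposition, same cost); same return value on every input.

-- string.punctuation
def pvPunct : List Char := "!\"#$%&'()*+,-./:;<=>?@[\\]^_`{|}~".toList

-- ===== PORT A =====
-- 'c in string.punctuation' for the single char c is membership: PySem.Chars.isIn [c] pvPunct.
-- The comprehension [s.strip() for s in subwords if cond(s.strip())] is filter-then-map.
def split_special_chars (token : String) : List String :=
  let cs := token.toList
  let subwords : List (List Char) :=
    if PySem.Chars.isIn ['/'] cs then
      (PySem.Chars.splitOn cs ['/']).foldl (fun sw part =>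
        if PySem.Chars.isIn ['-'] part then sw ++ PySem.Chars.splitOn part ['-']
        else sw ++ [part]) []
    else
      if PySem.Chars.isIn ['-'] cs then PySem.Chars.splitOn cs ['-'] else [cs]
  ((subwords.filter (fun s =>
      let t := PySem.Chars.strip s
      !t.isEmpty && !(t.all (fun c => PySem.Chars.isIn [c] pvPunct)))).map
    PySem.Chars.strip).map String.ofList

-- ===== PORT B =====
-- the character scan: flush the buffer at every '/' or '-'
def pvScan : List Char → List Char → List (List Char)
  | [], buf => [buf]
  | c :: rest, buf =>
      if c = '/' || c = '-' then buf :: pvScan rest [] else pvScan rest (buf ++ [c])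

def split_special_chars_alt (token : String) : List String :=
  let atoms := pvScan token.toList []
  (atoms.foldl (fun res s =>
      let t := PySem.Chars.strip s
      if !t.isEmpty && t.any (fun c => !pvPunct.contains c) then res ++ [t] else res)
    []).map String.ofList

-- ===== PRECONDITION & SPEC =====
def Spec_split_special_chars (token : String) (out : List String) : Prop := out = split_special_chars_alt token
instance (token : String) (out : List String) : Decidable (Spec_split_special_chars token out) := by unfold Spec_split_special_chars; infer_instance

-- ===== CLAIM (what is proved, stated in full; the proofs are below) =====
def Claim_equal_split_special_chars : Prop := ∀ (token : String), Dom_split_special_chars token → Spec_split_special_chars token (split_special_chars token)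

-- ===== LEMMAS AND PROOFS =====

-- split on a single character, structurally
def pvSplit1 (c : Char) : List Char → List (List Char)
  | [] => [[]]
  | x :: r =>
      if x = c then [] :: pvSplit1 c r
      else match pvSplit1 c r with
           | h :: t => (x :: h) :: t
           | [] => [[x]]

lemma pvSplit1_ne_nil (c : Char) (l : List Char) : pvSplit1 c l ≠ [] := by
  cases l with
  | nil => simp [pvSplit1]
  | cons x r =>
      simp only [pvSplit1]
      split_ifs with h
      · simp
      · rcases hr : pvSplit1 c r with _ | ⟨h1, t1⟩ <;> simp

lemma go_single (c : Char) : ∀ (fuel : Nat) (l cur : List Char) (acc : List (List Char)),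
    l.length < fuel →
    PySem.Chars.splitOn.go [c] fuel l cur acc =
      acc.reverse ++ (match pvSplit1 c l with
                      | h :: t => (cur.reverse ++ h) :: t
                      | [] => [cur.reverse]) := by
  intro fuel
  induction fuel with
  | zero => intro l cur acc h; omega
  | succ n ih =>
      intro l cur acc h
      cases l with
      | nil =>
          simp [PySem.Chars.splitOn.go, pvSplit1]
      | cons x r =>
          rw [PySem.Chars.splitOn.go]
          by_cases hx : x = c
          · subst hx
            simp only [List.isPrefixOf, beq_self_eq_true, Bool.true_and,
              List.isPrefixOf_nil_left, if_true, List.length_cons, List.drop_succ_cons]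
            simp only [List.length_nil, List.drop_zero]
            rw [ih r [] (cur.reverse :: acc) (by simpa using Nat.lt_of_succ_lt_succ h)]
            rcases hr : pvSplit1 x r with _ | ⟨h1, t1⟩
            · exact absurd hr (pvSplit1_ne_nil x r)
            · simp [pvSplit1, hr]
          · have hpre : [c].isPrefixOf (x :: r) = false := by
              simp [List.isPrefixOf]
              exact fun hc => absurd hc.symm hx
            rw [hpre]
            simp only [if_false, Bool.false_eq_true]
            rw [ih r (x :: cur) acc (by simpa using Nat.lt_of_succ_lt_succ h)]
            rcases hr : pvSplit1 c r with _ | ⟨h1, t1⟩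
            · exact absurd hr (pvSplit1_ne_nil c r)
            · simp [pvSplit1, hx, hr]

lemma splitOn_single (c : Char) (l : List Char) :
    PySem.Chars.splitOn l [c] = pvSplit1 c l := by
  unfold PySem.Chars.splitOn
  rw [go_single c (l.length + 1) l [] [] (Nat.lt_succ_self _)]
  rcases hr : pvSplit1 c l with _ | ⟨h1, t1⟩
  · exact absurd hr (pvSplit1_ne_nil c l)
  · simp

lemma isIn_single (c : Char) (l : List Char) :
    PySem.Chars.isIn [c] l = l.contains c := by
  by_cases h : c ∈ l
  · have : PySem.Chars.isIn [c] l = true := (PySem.Chars.isIn_iff_infix _ _).2 ((List.singleton_infix_iff c l).2 h)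
    simp [this, h]
  · have : PySem.Chars.isIn [c] l = false := by
      rw [PySem.Chars.isIn_eq_false_iff _ _]
      exact fun hi => h ((List.singleton_infix_iff c l).1 hi)
    simp [this, h]

lemma pvSplit1_not_mem (c : Char) (l : List Char) (h : c ∉ l) : pvSplit1 c l = [l] := by
  induction l with
  | nil => rfl
  | cons x r ih =>
      simp only [List.mem_cons, not_or] at h
      have hx : ¬ x = c := fun hxe => h.1 hxe.symm
      simp [pvSplit1, hx, ih h.2]

-- split on both delimiters, structurally
def pvSplitB : List Char → List (List Char)
  | [] => [[]]
  | x :: r =>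
      if x = '/' ∨ x = '-' then [] :: pvSplitB r
      else match pvSplitB r with
           | h :: t => (x :: h) :: t
           | [] => [[x]]

lemma pvSplitB_ne_nil (l : List Char) : pvSplitB l ≠ [] := by
  cases l with
  | nil => simp [pvSplitB]
  | cons x r =>
      simp only [pvSplitB]
      split_ifs with h
      · simp
      · rcases hr : pvSplitB r with _ | ⟨h1, t1⟩ <;> simp

lemma pvSplitB_eq_flatMap (l : List Char) :
    pvSplitB l = (pvSplit1 '/' l).flatMap (pvSplit1 '-') := by
  induction l with
  | nil => simp [pvSplitB, pvSplit1]
  | cons x r ih =>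
      by_cases hs : x = '/'
      · subst hs
        simp [pvSplitB, pvSplit1, ih]
      · by_cases hd : x = '-'
        · subst hd
          rcases hr : pvSplit1 '/' r with _ | ⟨h1, t1⟩
          · exact absurd hr (pvSplit1_ne_nil _ r)
          · rw [hr] at ih
            simp only [List.flatMap_cons] at ih
            simp only [pvSplitB, pvSplit1, hr]
            simp [pvSplit1, ih, hs]
        · rcases hr : pvSplit1 '/' r with _ | ⟨h1, t1⟩
          · exact absurd hr (pvSplit1_ne_nil _ r)
          · rw [hr] at ih
            simp only [List.flatMap_cons] at ih
            rcases hh : pvSplit1 '-' h1 with _ | ⟨h2, t2⟩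
            · exact absurd hh (pvSplit1_ne_nil _ h1)
            · simp only [pvSplitB, pvSplit1, hs, hd, if_neg (by tauto), if_neg hs, hr, hh,
                List.flatMap_cons, ih]
              simp [pvSplit1, hd, hh]

lemma pvScan_eq (l : List Char) : ∀ buf,
    pvScan l buf = match pvSplitB l with
                   | h :: t => (buf ++ h) :: t
                   | [] => [buf] := by
  induction l with
  | nil => intro buf; simp [pvScan, pvSplitB]
  | cons x r ih =>
      intro buf
      by_cases h : x = '/' ∨ x = '-'
      · have hb : (x = '/' || x = '-') = true := by
          rcases h with h | h <;> simp [h]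
        rw [pvScan, if_pos hb]
        rw [ih []]
        rcases hr : pvSplitB r with _ | ⟨h1, t1⟩
        · exact absurd hr (pvSplitB_ne_nil r)
        · simp [pvSplitB, h, hr]
      · have hb : (x = '/' || x = '-') = false := by
          push_neg at h; simp [h.1, h.2]
        rw [pvScan, if_neg (by simp [hb])]
        rw [ih (buf ++ [x])]
        rcases hr : pvSplitB r with _ | ⟨h1, t1⟩
        · exact absurd hr (pvSplitB_ne_nil r)
        · simp [pvSplitB, h, hr]

-- A's subwords equal the flat two-delimiter split
lemma subwordsA_eq (cs : List Char) :
    (if PySem.Chars.isIn ['/'] cs then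
      (PySem.Chars.splitOn cs ['/']).foldl (fun sw part =>
        if PySem.Chars.isIn ['-'] part then sw ++ PySem.Chars.splitOn part ['-']
        else sw ++ [part]) []
    else
      if PySem.Chars.isIn ['-'] cs then PySem.Chars.splitOn cs ['-'] else [cs]) =
    pvSplitB cs := by
  rw [pvSplitB_eq_flatMap]
  by_cases h : PySem.Chars.isIn ['/'] cs = true
  · rw [if_pos h]
    have : ∀ (parts : List (List Char)) (acc : List (List Char)),
        parts.foldl (fun sw part =>
          if PySem.Chars.isIn ['-'] part then sw ++ PySem.Chars.splitOn part ['-']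
          else sw ++ [part]) acc = acc ++ parts.flatMap (pvSplit1 '-') := by
      intro parts
      induction parts with
      | nil => intro acc; simp
      | cons p ps ihp =>
          intro acc
          simp only [List.foldl_cons, List.flatMap_cons]
          by_cases hp : PySem.Chars.isIn ['-'] p = true
          · rw [if_pos hp, ihp, splitOn_single, List.append_assoc]
          · have hmem : '-' ∉ p := by
              rw [isIn_single] at hp; simpa using hp
            rw [if_neg hp, ihp, pvSplit1_not_mem _ _ hmem, List.append_assoc]
    rw [this, splitOn_single]
    simp
  · rw [if_neg h]
    have hmem : '/' ∉ cs := by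
      rw [isIn_single] at h; simpa using h
    rw [pvSplit1_not_mem _ _ hmem]
    simp only [List.flatMap_cons, List.flatMap_nil, List.append_nil]
    by_cases hd : PySem.Chars.isIn ['-'] cs = true
    · rw [if_pos hd, splitOn_single]
    · have hmd : '-' ∉ cs := by
        rw [isIn_single] at hd; simpa using hd
      rw [if_neg hd, pvSplit1_not_mem _ _ hmd]

lemma cond_eq (t : List Char) :
    (!t.isEmpty && !(t.all (fun c => PySem.Chars.isIn [c] pvPunct))) =
    (!t.isEmpty && t.any (fun c => !pvPunct.contains c)) := by
  have h1 : (t.all (fun c => PySem.Chars.isIn [c] pvPunct)) =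
      (t.all (fun c => pvPunct.contains c)) := by
    induction t with
    | nil => rfl
    | cons x r ih => simp [List.all_cons, ih, isIn_single]
  have h2 : ∀ (p : Char → Bool) (l : List Char), (!(l.all p)) = l.any (fun c => !p c) := by
    intro p l
    induction l with
    | nil => rfl
    | cons x r ih => simp [List.all_cons, List.any_cons, Bool.not_and, ih]
  rw [h1, h2]

lemma foldl_filter (q : List Char → Bool) :
    ∀ (l : List (List Char)) (acc : List (List Char)),
      l.foldl (fun res s => if q (PySem.Chars.strip s) then res ++ [PySem.Chars.strip s] else res) acc
        = acc ++ (l.filter (fun s => q (PySem.Chars.strip s))).map PySem.Chars.strip := by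
  intro l
  induction l with
  | nil => intro acc; simp
  | cons x r ih =>
      intro acc
      simp only [List.foldl_cons, List.filter_cons]
      by_cases h : q (PySem.Chars.strip x) = true
      · rw [if_pos h, ih, if_pos h]; simp
      · rw [if_neg h, ih, if_neg h]

-- ===== VERDICT (by name: the statement is the Claim_ definition above) =====
theorem split_special_chars_spec : Claim_equal_split_special_chars := by
  intro token _
  unfold Spec_split_special_chars split_special_chars split_special_chars_alt
  simp only []
  rw [subwordsA_eq]
  rw [pvScan_eq]
  rcases hr : pvSplitB token.toList with _ | ⟨h1, t1⟩
  · exact absurd hr (pvSplitB_ne_nil _)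
  · show (((h1 :: t1).filter _).map _).map _ = _
    simp only [List.nil_append]
    rw [foldl_filter (fun t => !t.isEmpty && t.any (fun c => !pvPunct.contains c)) (h1 :: t1) []]
    simp only [List.nil_append]
    congr 1
    congr 1
    apply List.filter_congr
    intro s _
    exact cond_eq (PySem.Chars.strip s)
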